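-- pv_equiv track=rewrite | github.com/arnoldaz/advent-of-code | 2023/11/main.py | get_expanded_galaxy
-- ===== SOURCE A (Python) =====
-- def get_expanded_indexes(lines: list[str]) -> tuple[list[int], list[int]]:
--     empty_rows: list[int] = []
--     empty_columns: list[int] = []
--
--     for i, line in enumerate(lines):
--         if all(char == "." for char in line):
--             empty_rows.append(i)
--
--     for i in range(len(lines[0])):
--         if all(char == "." for char in [line[i] for line in lines]):
--             empty_columns.append(i)
--
--     return (empty_rows, empty_columns)
--
-- def get_expanded_galaxy(lines: list[str]) -> list[str]:
--     empty_rows, empty_columns = get_expanded_indexes(lines)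
--     new_lines = lines[:]
--
--     insertion_index = 0
--     for i in range(len(new_lines[0]) + len(empty_columns)):
--         if i - insertion_index in empty_columns:
--             for line_index in range(len(new_lines)):
--                 new_lines[line_index] = new_lines[line_index][:i] + "." + new_lines[line_index][i:]
--             empty_columns.remove(i - insertion_index)
--             insertion_index += 1
--
--     insertion_index = 0
--     for i in range(len(new_lines) + len(empty_rows)):
--         if i - insertion_index in empty_rows:
--             new_lines.insert(i, "." * len(new_lines[0]))
--             empty_rows.remove(i - insertion_index)
--             insertion_index += 1
--
--     return new_lines
-- ===== SOURCE B (Python) =====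
-- def get_expanded_galaxy(lines: list[str]) -> list[str]:
--     width = len(lines[0])
--     empty_columns = [c for c in range(width) if all(line[c] == "." for line in lines)]
--     new_width = width + len(empty_columns)
--     result: list[str] = []
--     for line in lines:
--         expanded = "".join("." + char if c in empty_columns else char
--                            for c, char in enumerate(line))
--         if all(char == "." for char in line):
--             result.append("." * new_width)
--         result.append(expanded)
--     return result
-- ===== Notes on version B (the rewrite author's own statement) =====
-- stated objective: alternative
-- what changed: A repeatedly splices a '.' into every row for each empty column and then splices duplicate blank rows into the list, tracking shifting insertion indexes and consuming the index lists with remove(); B makes one pass with no mutation or index bookkeeping: each row is rebuilt once by a join that doubles characters sitting in an empty column, and an all-dot row is emitted twice.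
import Mathlib
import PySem

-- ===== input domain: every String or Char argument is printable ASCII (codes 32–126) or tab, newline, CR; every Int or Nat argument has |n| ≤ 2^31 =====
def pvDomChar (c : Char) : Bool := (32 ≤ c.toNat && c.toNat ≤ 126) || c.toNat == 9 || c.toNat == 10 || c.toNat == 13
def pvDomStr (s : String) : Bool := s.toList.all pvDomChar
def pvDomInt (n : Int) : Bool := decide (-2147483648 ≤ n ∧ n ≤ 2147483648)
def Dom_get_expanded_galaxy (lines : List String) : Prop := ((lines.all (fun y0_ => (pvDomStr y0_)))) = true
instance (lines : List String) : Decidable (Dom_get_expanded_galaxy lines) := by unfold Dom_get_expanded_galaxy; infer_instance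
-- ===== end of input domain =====

-- B rebuilds each row once (join over enumerate, doubling empty columns) and emits all-dot rows
-- twice in a single pass, with no in-place splicing or shifting insertion indexes; objective:
-- alternative (same cost, different algorithm).

-- ===== PORT A =====
-- strings are handled as their List Char contents (the standard encoding); String.ofList at the end
def pvHeadLen (g : List (List Char)) : Nat := ((PySem.List.pyGet? g 0).getD []).length

-- the common shape of A's two insertion loops: state (data, pending indexes, insertion_index)
def pvBody {σ : Type} (F : σ → Int → σ) (st : σ × List Int × Int) (i : Int) :
    σ × List Int × Int :=
  if (i - st.2.2) ∈ st.2.1 then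
    (F st.1 i, (PySem.List.remove? st.2.1 (i - st.2.2)).getD st.2.1, st.2.2 + 1)
  else st

def get_expanded_indexes (g : List (List Char)) : List Int × List Int :=
  let empty_rows := (PySem.List.enumerate g 0).foldl
      (fun acc p => if p.2.all (· == '.') then acc ++ [p.1] else acc) ([] : List Int)
  let empty_columns := (PySem.List.pyRange 0 (pvHeadLen g : Int) 1).foldl
      (fun acc i =>
        if (g.map (fun line => (PySem.List.pyGet? line i).getD ' ')).all (· == '.')
        then acc ++ [i] else acc) ([] : List Int)
  (empty_rows, empty_columns)

-- new_lines[line_index] = new_lines[line_index][:i] + "." + new_lines[line_index][i:]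
def pvA_colBody : List (List Char) × List Int × Int → Int → List (List Char) × List Int × Int :=
  pvBody (fun ls i =>
    ls.map (fun l => PySem.List.slice l none (some i) ++ '.' :: PySem.List.slice l (some i) none))

-- new_lines.insert(i, "." * len(new_lines[0]))
def pvA_rowBody : List (List Char) × List Int × Int → Int → List (List Char) × List Int × Int :=
  pvBody (fun ls i => PySem.List.insert ls i (List.replicate (pvHeadLen ls) '.'))

def get_expanded_galaxy (lines : List String) : List String :=
  let g := lines.map String.toList
  let p := get_expanded_indexes g
  let st1 := (PySem.List.pyRange 0 ((pvHeadLen g : Int) + p.2.length) 1).foldl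
      pvA_colBody (g, p.2, 0)
  let st2 := (PySem.List.pyRange 0 ((st1.1.length : Int) + p.1.length) 1).foldl
      pvA_rowBody (st1.1, p.1, 0)
  st2.1.map (fun l => String.ofList l)

-- ===== PORT B =====
def get_expanded_galaxy_alt (lines : List String) : List String :=
  let g := lines.map String.toList
  let width := ((PySem.List.pyGet? g 0).getD []).length
  let empty_columns := (PySem.List.pyRange 0 (width : Int) 1).filter
      (fun c => g.all (fun line => (PySem.List.pyGet? line c).getD ' ' == '.'))
  let new_width := width + empty_columns.length
  (g.foldl (fun acc line =>
      let expanded := (PySem.List.enumerate line 0).flatMap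
          (fun p => if p.1 ∈ empty_columns then '.' :: [p.2] else [p.2])
      if line.all (· == '.') then (acc ++ [List.replicate new_width '.']) ++ [expanded]
      else acc ++ [expanded]) []).map (fun l => String.ofList l)

-- ===== PRECONDITION & SPEC =====
-- Pre_ excludes exactly the inputs on which A raises IndexError: the empty list (lines[0]) and
-- ragged inputs with some line shorter than the first line (line[i] in the column scan).
def Pre_get_expanded_galaxy (lines : List String) : Prop :=
  lines ≠ [] ∧ ∀ l ∈ lines, (lines.headD "").toList.length ≤ l.toList.length
instance (lines : List String) : Decidable (Pre_get_expanded_galaxy lines) := by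
  unfold Pre_get_expanded_galaxy; infer_instance

def pvWitness_get_expanded_galaxy : List String := ["#.", ".."]

def Spec_get_expanded_galaxy (lines : List String) (out : List String) : Prop :=
  out = get_expanded_galaxy_alt lines
instance (lines : List String) (out : List String) : Decidable (Spec_get_expanded_galaxy lines out) := by
  unfold Spec_get_expanded_galaxy; infer_instance

-- ===== CLAIM (what is proved, stated in full; the proofs are below) =====
def Claim_equal_get_expanded_galaxy : Prop := ∀ (lines : List String),
  Dom_get_expanded_galaxy lines → Pre_get_expanded_galaxy lines →
  Spec_get_expanded_galaxy lines (get_expanded_galaxy lines)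

-- ===== LEMMAS AND PROOFS =====

-- what A's insertion loop performs: F at positions c+k, consuming the pending list in order
def pvSeq {σ : Type} (F : σ → Int → σ) : List Int → Int → σ → σ
  | [], _, s => s
  | c :: cs, k, s => pvSeq F cs (k + 1) (F s (c + k))

-- the per-element view of the same insertions: d doubled in front of every listed position
def pvExpand {α : Type} (d : α) (cols : List Int) : Nat → List α → List α
  | _, [] => []
  | i, x :: t => (if (i : Int) ∈ cols then [d, x] else [x]) ++ pvExpand d cols (i + 1) t

def pvSliceF {α : Type} (d : α) (l : List α) (i : Int) : List α :=
  PySem.List.slice l none (some i) ++ d :: PySem.List.slice l (some i) none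

theorem pvBody_fixed {σ : Type} (F : σ → Int → σ) (s : σ) (k : Int) :
    ∀ L : List Int, L.foldl (pvBody F) (s, [], k) = (s, [], k) := by
  intro L
  induction L with
  | nil => rfl
  | cons x t ih => simpa [pvBody] using ih

theorem pvBody_skip {σ : Type} (F : σ → Int → σ) (s : σ) (c : Int) (cs : List Int) (k : Int)
    (hsort : (c :: cs).Pairwise (· < ·)) :
    ∀ L : List Int, (∀ i ∈ L, i < c + k) →
      L.foldl (pvBody F) (s, c :: cs, k) = (s, c :: cs, k) := by
  intro L
  induction L with
  | nil => intro _; rfl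
  | cons x t ih =>
    intro h
    have hx : x < c + k := h x (by simp)
    have hmem : (x - k) ∉ c :: cs := by
      intro hm
      rcases List.mem_cons.mp hm with h1 | h1
      · omega
      · have := (List.pairwise_cons.mp hsort).1 _ h1
        omega
    simp only [List.foldl_cons, pvBody, if_neg hmem]
    exact ih (fun i hi => h i (by simp [hi]))

theorem pvLoop {σ : Type} (F : σ → Int → σ) :
    ∀ (cols : List Int) (a n k : Int) (s : σ),
      cols.Pairwise (· < ·) →
      (∀ c ∈ cols, a ≤ c + k) →
      (∀ c ∈ cols, c + k + cols.length ≤ n) →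
      (PySem.List.pyRange a n 1).foldl (pvBody F) (s, cols, k)
        = (pvSeq F cols k s, [], k + cols.length) := by
  intro cols
  induction cols with
  | nil =>
    intro a n k s _ _ _
    simpa using pvBody_fixed F s k (PySem.List.pyRange a n 1)
  | cons c cs ih =>
    intro a n k s hsort h1 h2
    have hck : a ≤ c + k := h1 c (by simp)
    have hcn : c + k < n := by
      have := h2 c (by simp)
      simp only [List.length_cons] at this
      push_cast at this
      omega
    rw [PySem.List.pyRange_one_append a (c + k) n hck (by omega), List.foldl_append,
      pvBody_skip F s c cs k hsort _ (fun i hi => ((PySem.List.mem_pyRange_one).mp hi).2),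
      PySem.List.pyRange_one_cons hcn, List.foldl_cons]
    have harg : c + k - k = c := by ring
    have hstep : pvBody F (s, c :: cs, k) (c + k) = (F s (c + k), cs, k + 1) := by
      simp [pvBody, harg]
    rw [hstep, ih (c + k + 1) n (k + 1) (F s (c + k)) (List.pairwise_cons.mp hsort).2
        (fun c' hc' => by have := (List.pairwise_cons.mp hsort).1 c' hc'; omega)
        (fun c' hc' => by
          have := h2 c' (by simp [hc'])
          simp only [List.length_cons] at this
          push_cast at this ⊢
          omega)]
    simp only [pvSeq, List.length_cons, Prod.mk.injEq, true_and]
    push_cast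
    ring

theorem pvSeq_map {α : Type} (G : List α → Int → List α) :
    ∀ (cols : List Int) (k : Int) (ls : List (List α)),
      pvSeq (fun ls i => ls.map (fun l => G l i)) cols k ls
        = ls.map (fun l => pvSeq G cols k l) := by
  intro cols
  induction cols with
  | nil => intro k ls; simp [pvSeq]
  | cons c cs ih =>
    intro k ls
    simp only [pvSeq, ih, List.map_map]
    rfl

theorem pvExpand_nil_cols {α : Type} (d : α) : ∀ (i : Nat) (l : List α),
    pvExpand d [] i l = l := by
  intro i l
  induction l generalizing i with
  | nil => rfl
  | cons x t ih => simp [pvExpand, ih]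

theorem pvExpand_congr {α : Type} (d : α) (cols1 cols2 : List Int) :
    ∀ (l : List α) (i : Nat),
      (∀ n : Nat, i ≤ n → ((n : Int) ∈ cols1 ↔ (n : Int) ∈ cols2)) →
      pvExpand d cols1 i l = pvExpand d cols2 i l := by
  intro l
  induction l with
  | nil => intro i _; rfl
  | cons x t ih =>
    intro i h
    have hx := h i le_rfl
    simp only [pvExpand]
    rw [if_congr hx rfl rfl, ih (i + 1) (fun n hn => h n (by omega))]

theorem pvExpand_skip {α : Type} (d : α) (cols : List Int) :
    ∀ (l1 : List α) (i : Nat) (r : List α),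
      (∀ c ∈ cols, (i : Int) + l1.length ≤ c) →
      pvExpand d cols i (l1 ++ r) = l1 ++ pvExpand d cols (i + l1.length) r := by
  intro l1
  induction l1 with
  | nil => intro i r _; simp
  | cons x t ih =>
    intro i r h
    have hx : ((i : Int)) ∉ cols := by
      intro hm; have := h _ hm; simp at this; omega
    simp only [List.cons_append, pvExpand, if_neg hx, List.cons.injEq, true_and]
    rw [ih (i + 1) r (by intro c hc; have := h c hc; simp at this ⊢; omega)]
    have h2 : i + 1 + t.length = i + (t.length + 1) := by omega
    simp [h2]

theorem pvSeq_expand {α : Type} (d : α) :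
    ∀ (cols : List Int) (i k : Nat) (p l : List α),
      cols.Pairwise (· < ·) →
      (∀ c ∈ cols, (i : Int) ≤ c ∧ c < (i : Int) + l.length) →
      p.length = i + k →
      pvSeq (pvSliceF d) cols (k : Int) (p ++ l) = p ++ pvExpand d cols i l := by
  intro cols
  induction cols with
  | nil => intro i k p l _ _ _; simp [pvSeq, pvExpand_nil_cols]
  | cons c cs ih =>
    intro i k p l hsort hb hp
    obtain ⟨hci, hcl⟩ := hb c (by simp)
    set t : Nat := c.toNat - i with ht
    have hc0 : (0 : Int) ≤ c := le_trans (by positivity) hci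
    have hct : c = ((i + t : Nat) : Int) := by push_cast; omega
    have htl : t < l.length := by omega
    have hdrop : l.drop t = l[t] :: l.drop (t + 1) := List.drop_eq_getElem_cons htl
    have hstep : pvSliceF d (p ++ l) (c + k)
        = (p ++ l.take t ++ [d, l[t]]) ++ l.drop (t + 1) := by
      have hn : (c + (k : Int)).toNat = p.length + t := by push_cast at hct ⊢; omega
      have e1 : List.take (p.length + t) p = p := List.take_of_length_le (by omega)
      have e2 : List.drop (p.length + t) p = ([] : List α) := List.drop_of_length_le (by omega)
      have e3 : p.length + t - p.length = t := by omega
      rw [pvSliceF, PySem.List.slice_to _ (by omega), PySem.List.slice_from _ (by omega), hn,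
        List.take_append, List.drop_append, e1, e2, e3, hdrop]
      simp
    have hlen : l.length = t + 1 + (l.drop (t + 1)).length := by
      simp [List.length_drop]; omega
    have ihres := ih (i + t + 1) (k + 1) (p ++ l.take t ++ [d, l[t]]) (l.drop (t + 1))
      (List.pairwise_cons.mp hsort).2
      (fun c' hc' => by
        have hlt := (List.pairwise_cons.mp hsort).1 c' hc'
        have hub := (hb c' (by simp [hc'])).2
        constructor
        · push_cast at hct ⊢; omega
        · push_cast at hct hub ⊢; omega)
      (by simp [List.length_take]; omega)
    have hk1 : ((k : Int)) + 1 = ((k + 1 : Nat) : Int) := by push_cast; ring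
    calc pvSeq (pvSliceF d) (c :: cs) (k : Int) (p ++ l)
        = pvSeq (pvSliceF d) cs ((k : Int) + 1) (pvSliceF d (p ++ l) (c + k)) := rfl
      _ = (p ++ l.take t ++ [d, l[t]]) ++ pvExpand d cs (i + t + 1) (l.drop (t + 1)) := by
          rw [hstep, hk1]; exact ihres
      _ = p ++ pvExpand d (c :: cs) i l := by
          conv_rhs => rw [← List.take_append_drop t l, hdrop]
          rw [pvExpand_skip d (c :: cs) (l.take t) i (l[t] :: l.drop (t + 1))
            (fun c' hc' => by
              rcases List.mem_cons.mp hc' with h1 | h1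
              · subst h1; simp [List.length_take]; push_cast at hct ⊢; omega
              · have := (List.pairwise_cons.mp hsort).1 c' h1
                simp [List.length_take]; push_cast at hct ⊢; omega)]
          have hmin : (List.take t l).length = t := by simp [List.length_take]; omega
          rw [hmin]
          have hmem : ((i + t : Nat) : Int) ∈ c :: cs := by rw [← hct]; simp
          simp only [pvExpand]
          rw [if_pos hmem,
            pvExpand_congr d (c :: cs) cs (l.drop (t + 1)) (i + t + 1)
              (fun n hn => by
                have hne : ((n : Int)) ≠ c := by push_cast at hct ⊢; omega
                simp [List.mem_cons, hne])]
          simp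

theorem pvSeq_slice_length {α : Type} (d : α) :
    ∀ (cols : List Int) (k : Int) (l : List α), (∀ c ∈ cols, 0 ≤ c + k) →
      (pvSeq (pvSliceF d) cols k l).length = l.length + cols.length := by
  intro cols
  induction cols with
  | nil => intro k l _; simp [pvSeq]
  | cons c cs ih =>
    intro k l hb
    have hc : 0 ≤ c + k := hb c (by simp)
    show (pvSeq (pvSliceF d) cs (k + 1) (pvSliceF d l (c + k))).length = _
    rw [ih (k + 1) _ (fun c' hc' => by have := hb c' (by simp [hc']); omega)]
    rw [pvSliceF, PySem.List.slice_to _ (by omega), PySem.List.slice_from _ (by omega)]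
    simp
    omega

theorem pvHeadLen_cons (h : List Char) (t : List (List Char)) :
    pvHeadLen (h :: t) = h.length := by
  simp [pvHeadLen, pysem]

theorem pvSeq_rows_const (m : Nat) :
    ∀ (rows : List Int) (k : Nat) (ls : List (List Char)),
      (∀ r ∈ rows, 0 ≤ r ∧ r + k ≤ ls.length) → ls ≠ [] → pvHeadLen ls = m →
      pvSeq (fun ls i => PySem.List.insert ls i (List.replicate (pvHeadLen ls) '.')) rows (k : Int) ls
        = pvSeq (pvSliceF (List.replicate m '.')) rows (k : Int) ls := by
  intro rows
  induction rows with
  | nil => intro k ls _ _ _; rfl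
  | cons r rs ih =>
    intro k ls hb hne hm
    obtain ⟨hr0, hrk⟩ := hb r (by simp)
    obtain ⟨n, hn⟩ : ∃ n : Nat, (r + (k : Int)).toNat = n := ⟨_, rfl⟩
    have hj : r + (k : Int) = (n : Int) := by omega
    have hjle : n ≤ ls.length := by omega
    have hstepL : PySem.List.insert ls (r + (k : Int)) (List.replicate (pvHeadLen ls) '.')
        = ls.take n ++ List.replicate m '.' :: ls.drop n := by
      rw [hm, hj]
      exact PySem.List.insert_natCast ls n _ hjle
    have hstepR : pvSliceF (List.replicate m '.') ls (r + (k : Int))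
        = ls.take n ++ List.replicate m '.' :: ls.drop n := by
      have e1 := PySem.List.slice_to ls (b := r + (k : Int)) (by omega)
      have e2 := PySem.List.slice_from ls (a := r + (k : Int)) (by omega)
      simp only [pvSliceF, e1, e2]
      rw [hn]
    have hlen : (ls.take n ++ List.replicate m '.' :: ls.drop n).length = ls.length + 1 := by
      simp only [List.length_append, List.length_take, List.length_cons, List.length_drop]
      omega
    have hne' : ls.take n ++ List.replicate m '.' :: ls.drop n ≠ [] := by
      intro hcontra
      rw [hcontra] at hlen
      simp at hlen
    have hm' : pvHeadLen (ls.take n ++ List.replicate m '.' :: ls.drop n) = m := by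
      rcases Nat.eq_zero_or_pos n with h0 | hpos
      · rw [h0]; simp [pvHeadLen_cons]
      · obtain ⟨h, t, rfl⟩ := List.exists_cons_of_ne_nil hne
        obtain ⟨n', rfl⟩ := Nat.exists_eq_succ_of_ne_zero (Nat.pos_iff_ne_zero.mp hpos)
        rw [List.take_succ_cons, List.cons_append, pvHeadLen_cons, ← pvHeadLen_cons h t, hm]
    show pvSeq _ rs ((k : Int) + 1) _ = pvSeq _ rs ((k : Int) + 1) _
    simp only []
    rw [hstepL, hstepR]
    have hcast : ((k : Int)) + 1 = ((k + 1 : Nat) : Int) := by push_cast; ring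
    rw [hcast]
    exact ih (k + 1) _ (fun r' hr' => by
        have := hb r' (by simp [hr'])
        constructor
        · exact this.1
        · rw [hlen]; push_cast at this ⊢; omega) hne' hm'

theorem pvExpand_eq_flatMap_enum {α : Type} (d : α) (cols : List Int) :
    ∀ (l : List α) (i : Nat),
      (PySem.List.enumerate l (i : Int)).flatMap
          (fun p => if p.1 ∈ cols then d :: [p.2] else [p.2])
        = pvExpand d cols i l := by
  intro l
  induction l with
  | nil => intro i; simp [PySem.List.enumerate_nil, pvExpand]
  | cons x t ih =>
    intro i
    rw [PySem.List.enumerate_cons, List.flatMap_cons]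
    have hcast : ((i : Int)) + 1 = (((i + 1 : Nat)) : Int) := by push_cast; ring
    rw [hcast, ih (i + 1)]
    simp only [pvExpand]

theorem pvExpand_rows {α β : Type} (d : β) (rows : List Int) (f : α → β) (q : α → Bool) :
    ∀ (g : List α) (i : Nat),
      (∀ (j : Nat) (h : j < g.length), (((i + j : Nat) : Int) ∈ rows ↔ q g[j] = true)) →
      pvExpand d rows i (g.map f)
        = g.flatMap (fun l => if q l = true then [d, f l] else [f l]) := by
  intro g
  induction g with
  | nil => intro i _; rfl
  | cons x t ih =>
    intro i h
    have h0 : (((i : Nat)) : Int) ∈ rows ↔ q x = true := by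
      have := h 0 (by simp)
      simpa using this
    rw [List.map_cons, List.flatMap_cons]
    simp only [pvExpand]
    rw [if_congr h0 rfl rfl, ih (i + 1) (fun j hj => by
      have := h (j + 1) (by simpa using Nat.succ_lt_succ hj)
      have harith : i + (j + 1) = i + 1 + j := by omega
      rw [harith] at this
      simpa using this)]

-- ===== VERDICT (by name: the statement is the Claim_ definition above) =====
theorem get_expanded_galaxy_spec : Claim_equal_get_expanded_galaxy := by
  intro lines _ hpre
  obtain ⟨hne, hlen0⟩ := hpre
  obtain ⟨s0, rest, rfl⟩ := List.exists_cons_of_ne_nil hne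
  have hG : (s0 :: rest).map String.toList = s0.toList :: rest.map String.toList := rfl
  generalize hGdef : (s0 :: rest).map String.toList = G at hG
  have hW : pvHeadLen G = s0.toList.length := by rw [hG, pvHeadLen_cons]
  have hq : (fun (i : Int) =>
        (G.map (fun line => (PySem.List.pyGet? line i).getD ' ')).all (· == '.'))
      = fun (c : Int) => G.all (fun line => (PySem.List.pyGet? line c).getD ' ' == '.') := by
    funext i
    rw [List.all_map]
    rfl
  have hrow_len : ∀ l ∈ G, s0.toList.length ≤ l.length := by
    intro l hl
    rw [← hGdef] at hl
    obtain ⟨x, hx, rfl⟩ := List.mem_map.mp hl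
    simpa using hlen0 x hx
  set q : Int → Bool := fun c => G.all (fun line => (PySem.List.pyGet? line c).getD ' ' == '.')
    with hqdef
  set cols : List Int := (PySem.List.pyRange 0 (s0.toList.length : Int) 1).filter q with hcolsdef
  have hsortC : cols.Pairwise (· < ·) :=
    List.Pairwise.filter _ (PySem.List.pairwise_lt_pyRange_one 0 (s0.toList.length : Int))
  have hboundC : ∀ c ∈ cols, 0 ≤ c ∧ c < (s0.toList.length : Int) := by
    intro c hc
    exact (PySem.List.mem_pyRange_one).mp (List.mem_of_mem_filter hc)
  set pr : List Char → Bool := fun l => l.all (· == '.') with hprdef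
  set rows : List Int := ((PySem.List.enumerate G 0).filter (fun p => pr p.2)).map (fun p => p.1)
    with hrowsdef
  have hsortR : rows.Pairwise (· < ·) := by
    rw [hrowsdef]
    exact (List.pairwise_map).mpr (List.Pairwise.filter _ (PySem.List.pairwise_lt_enumerate G 0))
  have hcharR : ∀ (j : Nat) (hj : j < G.length), (((j : Int)) ∈ rows ↔ pr G[j] = true) := by
    intro j hj
    constructor
    · intro hm
      obtain ⟨p, hp, hpj⟩ := List.mem_map.mp hm
      obtain ⟨hpf, hpr⟩ := List.mem_filter.mp hp
      obtain ⟨k, hk, rfl⟩ := (PySem.List.mem_enumerate_iff G 0 p).mp hpf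
      simp only [zero_add] at hpj
      have hkj : k = j := by exact_mod_cast hpj
      subst hkj
      simpa using hpr
    · intro hpr
      refine List.mem_map.mpr ⟨((j : Int), G[j]), List.mem_filter.mpr ⟨?_, by simpa using hpr⟩, rfl⟩
      exact (PySem.List.mem_enumerate_iff G 0 _).mpr ⟨j, hj, by simp⟩
  have hboundR : ∀ r ∈ rows, 0 ≤ r ∧ r < (G.length : Int) := by
    intro r hr
    obtain ⟨p, hp, rfl⟩ := List.mem_map.mp hr
    obtain ⟨hpf, _⟩ := List.mem_filter.mp hp
    obtain ⟨k, hk, rfl⟩ := (PySem.List.mem_enumerate_iff G 0 p).mp hpf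
    constructor
    · simp
    · simpa using hk
  have hidx : get_expanded_indexes G = (rows, cols) := by
    rw [get_expanded_indexes]
    simp only [hW]
    rw [PySem.List.foldl_append_if (fun p => p.2.all (· == '.')) (fun p => p.1)
        (PySem.List.enumerate G 0) [],
      PySem.List.foldl_append_if_eq_filter _ (PySem.List.pyRange 0 (s0.toList.length : Int) 1) [],
      hq]
    simp [hrowsdef, hcolsdef, hprdef, hqdef]
  -- the per-row expansion both programs perform
  have hexp : ∀ l ∈ G, pvSeq (pvSliceF '.') cols 0 l = pvExpand '.' cols 0 l := by
    intro l hl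
    have hb : ∀ c ∈ cols, ((0 : Nat) : Int) ≤ c ∧ c < ((0 : Nat) : Int) + l.length := by
      intro c hc
      have h1 := hboundC c hc
      have h2 := hrow_len l hl
      constructor
      · simpa using h1.1
      · push_cast
        omega
    simpa using pvSeq_expand '.' cols 0 0 [] l hsortC hb rfl
  have hheadlen : (pvExpand '.' cols 0 s0.toList).length = s0.toList.length + cols.length := by
    rw [← hexp s0.toList (by rw [hG]; simp)]
    exact pvSeq_slice_length '.' cols 0 s0.toList (fun c hc => by
      have := hboundC c hc; omega)
  have hA : get_expanded_galaxy (s0 :: rest)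
      = (pvExpand (List.replicate (s0.toList.length + cols.length) '.') rows 0
          (G.map (fun l => pvExpand '.' cols 0 l))).map String.ofList := by
    rw [get_expanded_galaxy]
    simp only [hGdef, hidx, hW, pvA_colBody]
    rw [pvLoop _ cols 0 _ 0 G hsortC (fun c hc => by have := hboundC c hc; omega)
      (fun c hc => by have := hboundC c hc; omega)]
    have hFc : (fun (ls : List (List Char)) (i : Int) =>
          ls.map (fun l => PySem.List.slice l none (some i) ++ '.' :: PySem.List.slice l (some i) none))
        = fun ls i => ls.map (fun l => pvSliceF '.' l i) := rfl
    rw [hFc, pvSeq_map (pvSliceF '.') cols 0 G, List.map_congr_left hexp]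
    simp only [pvA_rowBody, List.length_map]
    rw [pvLoop _ rows 0 _ 0 _ hsortR (fun r hr => by have := hboundR r hr; omega)
      (fun r hr => by have := hboundR r hr; omega)]
    have hrc := pvSeq_rows_const (s0.toList.length + cols.length) rows 0
      (G.map (fun l => pvExpand '.' cols 0 l))
      (fun r hr => by
        have := hboundR r hr
        constructor
        · exact this.1
        · simp only [List.length_map]; push_cast; omega)
      (by rw [hG]; simp)
      (by rw [hG]; simp only [List.map_cons, pvHeadLen_cons]; exact hheadlen)
    simp only [Nat.cast_zero] at hrc
    rw [hrc]
    have hb2 : ∀ r ∈ rows, ((0 : Nat) : Int) ≤ r ∧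
        r < ((0 : Nat) : Int) + (G.map (fun l => pvExpand '.' cols 0 l)).length := by
      intro r hr
      have := hboundR r hr
      constructor
      · simpa using this.1
      · simpa using this.2
    have he2 := pvSeq_expand (List.replicate (s0.toList.length + cols.length) '.') rows 0 0 []
      (G.map (fun l => pvExpand '.' cols 0 l)) hsortR hb2 rfl
    simp only [Nat.cast_zero, List.nil_append] at he2
    rw [he2]
  have hB : get_expanded_galaxy_alt (s0 :: rest)
      = (G.flatMap (fun l => if pr l = true
            then [List.replicate (s0.toList.length + cols.length) '.', pvExpand '.' cols 0 l]
            else [pvExpand '.' cols 0 l])).map String.ofList := by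
    rw [get_expanded_galaxy_alt]
    simp only [hGdef]
    have hWB : ((PySem.List.pyGet? G 0).getD []).length = s0.toList.length := hW
    rw [hWB]
    have hbody : (fun (acc : List (List Char)) (line : List Char) =>
          if line.all (· == '.')
          then (acc ++ [List.replicate (s0.toList.length + cols.length) '.']) ++
            [(PySem.List.enumerate line 0).flatMap
              (fun p => if p.1 ∈ cols then '.' :: [p.2] else [p.2])]
          else acc ++ [(PySem.List.enumerate line 0).flatMap
              (fun p => if p.1 ∈ cols then '.' :: [p.2] else [p.2])])
        = fun acc line => acc ++ (if pr line = true
            then [List.replicate (s0.toList.length + cols.length) '.', pvExpand '.' cols 0 line]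
            else [pvExpand '.' cols 0 line]) := by
      funext acc line
      have he : (PySem.List.enumerate line 0).flatMap
          (fun p => if p.1 ∈ cols then '.' :: [p.2] else [p.2]) = pvExpand '.' cols 0 line := by
        simpa using pvExpand_eq_flatMap_enum '.' cols line 0
      rw [he, hprdef]
      split_ifs <;> simp
    rw [hbody, PySem.List.foldl_append_eq_flatMap]
    simp
  show get_expanded_galaxy (s0 :: rest) = get_expanded_galaxy_alt (s0 :: rest)
  rw [hA, hB,
    pvExpand_rows (List.replicate (s0.toList.length + cols.length) '.') rows
      (fun l => pvExpand '.' cols 0 l) pr G 0 (fun j hj => by simpa using hcharR j hj)]
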